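-- pv_equiv track=rewrite | github.com/LukeElliman/Practicals | Prac_04/memberwise_addition.py | add_memberwise
-- ===== SOURCE A (Python) =====
-- def add_memberwise(list_one: list, list_two: list) -> list:
--     #Checks how many numbers can be added before the lists go out of index
--     if len(list_one) == len(list_two):
--         min_length = len(list_one)
--     elif len(list_one) < len(list_two):
--         min_length = len(list_one)
--     else:
--         min_length = len(list_two)
--
--     #Adds numbers together
--     added_list = []
--     for number in range(min_length):
--         added_number = list_one[number] + list_two[number]
--         added_list.append(added_number)
--
--     #Adds numbers that haven't been added if list are not same length
--     if len(list_one) != len(list_two):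
--         if len(list_one) < len(list_two):
--             for number in range(min_length, len(list_two)):
--                 added_list.append(list_two[number])
--         else:
--             for number in range(min_length, len(list_one)):
--                 added_list.append(list_one[number])
--
--     return added_list
-- ===== SOURCE B (Python) =====
-- from itertools import zip_longest
--
-- def add_memberwise(list_one: list, list_two: list) -> list:
--     sentinel = object()
--     result = []
--     for a, b in zip_longest(list_one, list_two, fillvalue=sentinel):
--         if a is sentinel:
--             result.append(b)
--         elif b is sentinel:
--             result.append(a)
--         else:
--             result.append(a + b)
--     return result
-- ===== Notes on version B (the rewrite author's own statement) =====
-- stated objective: idiomatic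
-- what changed: Replaces the min-length computation, index-based addition loop and separate tail-copy loops by one uniform pass over itertools.zip_longest with a unique sentinel fill value.
import Mathlib
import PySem

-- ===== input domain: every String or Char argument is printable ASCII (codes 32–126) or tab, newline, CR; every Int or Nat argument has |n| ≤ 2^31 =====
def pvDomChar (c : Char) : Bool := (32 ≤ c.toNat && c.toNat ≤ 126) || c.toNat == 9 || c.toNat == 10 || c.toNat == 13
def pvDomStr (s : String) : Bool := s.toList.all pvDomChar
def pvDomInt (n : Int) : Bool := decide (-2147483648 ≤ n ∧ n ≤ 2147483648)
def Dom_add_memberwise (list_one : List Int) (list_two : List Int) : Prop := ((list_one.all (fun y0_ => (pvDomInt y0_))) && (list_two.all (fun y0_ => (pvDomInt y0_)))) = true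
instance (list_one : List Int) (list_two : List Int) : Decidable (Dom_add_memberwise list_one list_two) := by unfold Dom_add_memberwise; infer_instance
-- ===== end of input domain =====

-- B replaces A's min-length addition loop plus separate tail-copy loops by one
-- uniform pass over zip_longest with a sentinel (idiomatic; same cost).

-- ===== PORT A =====
def add_memberwise (list_one : List Int) (list_two : List Int) : List Int :=
  let min_length : Int :=
    if (list_one.length : Int) = list_two.length then (list_one.length : Int)
    else if (list_one.length : Int) < list_two.length then (list_one.length : Int)
    else (list_two.length : Int)
  let added_list : List Int :=
    (PySem.List.pyRange 0 min_length 1).foldl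
      (fun acc number => acc ++ [PySem.List.pyGetD list_one number 0 + PySem.List.pyGetD list_two number 0]) []
  if (list_one.length : Int) ≠ list_two.length then
    if (list_one.length : Int) < list_two.length then
      (PySem.List.pyRange min_length list_two.length 1).foldl
        (fun acc number => acc ++ [PySem.List.pyGetD list_two number 0]) added_list
    else
      (PySem.List.pyRange min_length list_one.length 1).foldl
        (fun acc number => acc ++ [PySem.List.pyGetD list_one number 0]) added_list
  else added_list

-- ===== PORT B =====
-- zip_longest with a sentinel: the sentinel cases are the branches where one
-- list is exhausted; structural recursion over the two lists realises the
-- single uniform traversal of Source B.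
def add_memberwise_alt : List Int → List Int → List Int
  | [], list_two => list_two            -- first element is the sentinel
  | list_one, [] => list_one            -- second element is the sentinel
  | a :: list_one, b :: list_two => (a + b) :: add_memberwise_alt list_one list_two

-- ===== PRECONDITION & SPEC =====
def Spec_add_memberwise (list_one : List Int) (list_two : List Int) (out : List Int) : Prop := out = add_memberwise_alt list_one list_two
instance (list_one : List Int) (list_two : List Int) (out : List Int) : Decidable (Spec_add_memberwise list_one list_two out) := by unfold Spec_add_memberwise; infer_instance

-- ===== CLAIM (what is proved, stated in full; the proofs are below) =====
def Claim_equal_add_memberwise : Prop := ∀ (list_one : List Int) (list_two : List Int), Dom_add_memberwise list_one list_two → Spec_add_memberwise list_one list_two (add_memberwise list_one list_two)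

-- ===== LEMMAS AND PROOFS =====

-- B computes zipWith (+) followed by both tails (one of which is empty).
theorem alt_eq_zipWith (l1 l2 : List Int) :
    add_memberwise_alt l1 l2 =
      List.zipWith (· + ·) l1 l2 ++ l1.drop l2.length ++ l2.drop l1.length := by
  induction l1 generalizing l2 with
  | nil => cases l2 <;> simp [add_memberwise_alt]
  | cons a l1 ih =>
    cases l2 with
    | nil => simp [add_memberwise_alt]
    | cons b l2 => simp [add_memberwise_alt, ih]

-- A's first loop produces zipWith (+).
theorem range_map_zipWith (l1 l2 : List Int) (n : Nat) (hn : n = min l1.length l2.length) :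
    (PySem.List.pyRange 0 (n : Nat) 1).map
      (fun j => PySem.List.pyGetD l1 j 0 + PySem.List.pyGetD l2 j 0) =
      List.zipWith (· + ·) l1 l2 := by
  subst hn
  apply List.ext_getElem
  · simp [PySem.List.length_pyRange_one]; omega
  · intro k h1 h2
    have hk : k < min l1.length l2.length := by
      simp [PySem.List.length_pyRange_one] at h1; omega
    have h1' : k < l1.length := lt_of_lt_of_le hk (Nat.min_le_left _ _)
    have h2' : k < l2.length := lt_of_lt_of_le hk (Nat.min_le_right _ _)
    simp [PySem.List.getElem_pyRange_one, PySem.List.pyGetD_natCast, List.getD,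
      List.getElem?_eq_getElem h1', List.getElem?_eq_getElem h2']

theorem add_memberwise_spec' (l1 l2 : List Int) :
    add_memberwise l1 l2 = add_memberwise_alt l1 l2 := by
  rw [alt_eq_zipWith]
  unfold add_memberwise
  rcases lt_trichotomy l1.length l2.length with h | h | h
  · have hne : (l1.length : Int) ≠ l2.length := by exact_mod_cast Nat.ne_of_lt h
    have hlt : (l1.length : Int) < l2.length := by exact_mod_cast h
    have hmin : min l1.length l2.length = l1.length := Nat.min_eq_left (le_of_lt h)
    rw [if_neg hne, if_pos hlt, if_pos hne, if_pos hlt]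
    simp only [PySem.List.foldl_append_singleton_eq_map]
    have htail := PySem.List.map_pyGetD_pyRange l2 0 (a := (l1.length : Int)) (Int.natCast_nonneg _)
    rw [show PySem.List.len l2 = ((l2.length : Nat) : Int) from rfl] at htail
    rw [range_map_zipWith l1 l2 l1.length hmin.symm, htail]
    simp [List.drop_of_length_le (le_of_lt h)]
  · have heq : (l1.length : Int) = l2.length := by exact_mod_cast h
    rw [if_pos heq, if_neg (by simp [heq] : ¬ (l1.length : Int) ≠ l2.length)]
    simp only [PySem.List.foldl_append_singleton_eq_map]
    rw [range_map_zipWith l1 l2 l1.length (by omega)]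
    simp [List.drop_of_length_le (le_of_eq h), List.drop_of_length_le (le_of_eq h.symm)]
  · have hne : (l1.length : Int) ≠ l2.length := by exact_mod_cast Nat.ne_of_gt h
    have hnlt : ¬ (l1.length : Int) < l2.length := by exact_mod_cast not_lt.mpr (le_of_lt h)
    have hmin : min l1.length l2.length = l2.length := Nat.min_eq_right (le_of_lt h)
    rw [if_neg hne, if_neg hnlt, if_pos hne, if_neg hnlt]
    simp only [PySem.List.foldl_append_singleton_eq_map]
    have htail := PySem.List.map_pyGetD_pyRange l1 0 (a := (l2.length : Int)) (Int.natCast_nonneg _)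
    rw [show PySem.List.len l1 = ((l1.length : Nat) : Int) from rfl] at htail
    rw [range_map_zipWith l1 l2 l2.length hmin.symm, htail]
    simp [List.drop_of_length_le (le_of_lt h)]

-- ===== VERDICT (by name: the statement is the Claim_ definition above) =====
theorem add_memberwise_spec : Claim_equal_add_memberwise := by
  intro l1 l2 _
  exact add_memberwise_spec' l1 l2
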